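-- pv_equiv track=rewrite | github.com/ymiseddy/EverybodyCodes | KingdomOfAlgorithmia2024/q7/main.py | sim_run
-- ===== SOURCE A (Python) =====
-- def sim_run(track, operations, loops=10):
--     initial = 10
--     total = 0
--     for x in range(loops * len(track)):
--         p = (x + 1) % len(track)
--         op = operations[x % len(operations)]
--         c = track[p]
--         if c == "+":
--             initial += 1
--         elif c == "-":
--             initial -= 1
--         elif c == "=" or c == "S":
--             initial += op
--         total += initial
--     return total
-- ===== SOURCE B (Python) =====
-- def step_delta(track, operations, x):
--     c = track[(x + 1) % len(track)]
--     op = operations[x % len(operations)]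
--     return 1 if c == "+" else -1 if c == "-" else op if c in ("=", "S") else 0
--
--
-- def sim_run(track, operations, loops=10):
--     # Staged passes, back-to-front: build the per-step deltas once, then walk
--     # them in reverse with a growing weight (each delta counts once per step
--     # from its own position to the end); the base 10 contributes 10 per step.
--     n = loops * len(track)
--     if n <= 0:
--         return 0
--     deltas = [step_delta(track, operations, x) for x in range(n)]
--     acc = 0
--     w = 0
--     for d in reversed(deltas):
--         w += 1
--         acc += d * w
--     return 10 * n + acc
-- ===== Notes on version B (the rewrite author's own statement) =====
-- stated objective: alternative
-- what changed: Replaces A's running accumulator (initial updated and re-added each step) by staged passes: a comprehension builds the per-step delta list once, then a reversed walk with a growing weight sums each delta times its number of remaining steps, added to the closed-form base 10*n.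
import Mathlib
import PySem

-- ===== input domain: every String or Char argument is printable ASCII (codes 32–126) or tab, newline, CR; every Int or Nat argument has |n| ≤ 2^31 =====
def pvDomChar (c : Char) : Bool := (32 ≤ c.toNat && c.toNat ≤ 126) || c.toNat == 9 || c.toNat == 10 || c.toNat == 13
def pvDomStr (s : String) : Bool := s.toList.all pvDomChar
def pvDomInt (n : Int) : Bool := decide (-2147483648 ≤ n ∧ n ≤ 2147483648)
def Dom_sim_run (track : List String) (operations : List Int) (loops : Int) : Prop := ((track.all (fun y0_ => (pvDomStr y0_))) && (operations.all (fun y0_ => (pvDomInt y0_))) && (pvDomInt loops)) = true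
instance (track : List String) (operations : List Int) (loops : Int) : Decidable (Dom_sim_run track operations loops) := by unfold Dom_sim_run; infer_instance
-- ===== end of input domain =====

-- B replaces A's running accumulator by staged passes: build the delta list, then a reversed weighted walk (alternative decomposition, same cost).

-- ===== PORT A =====
def sim_run (track : List String) (operations : List Int) (loops : Int) : Int :=
  let st := (PySem.List.pyRange 0 (loops * (track.length : Int)) 1).foldl
    (fun (s : Int × Int) x =>
      let p := PySem.Int.mod (x + 1) (track.length : Int)
      let op := PySem.List.pyGetD operations (PySem.Int.mod x (operations.length : Int)) 0
      let c := PySem.List.pyGetD track p ""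
      let initial :=
        if c = "+" then s.1 + 1
        else if c = "-" then s.1 - 1
        else if c = "=" ∨ c = "S" then s.1 + op
        else s.1
      (initial, s.2 + initial))
    (10, 0)
  st.2

-- ===== PORT B =====
-- helper of Source B: the per-step delta
def pvStepDelta (track : List String) (operations : List Int) (x : Int) : Int :=
  let c := PySem.List.pyGetD track (PySem.Int.mod (x + 1) (track.length : Int)) ""
  let op := PySem.List.pyGetD operations (PySem.Int.mod x (operations.length : Int)) 0
  if c = "+" then 1 else if c = "-" then -1 else if c = "=" ∨ c = "S" then op else 0

def sim_run_alt (track : List String) (operations : List Int) (loops : Int) : Int :=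
  let n : Int := loops * (track.length : Int)
  if n ≤ 0 then 0
  else
    let deltas := (PySem.List.pyRange 0 n 1).map (pvStepDelta track operations)
    let st := deltas.reverse.foldl
      (fun (s : Int × Int) d => (s.1 + 1, s.2 + d * (s.1 + 1))) (0, 0)
    10 * n + st.2

-- ===== PRECONDITION & SPEC =====
-- Pre_ excludes exactly the inputs where Python A raises ZeroDivisionError:
-- operations empty while the loop body runs at least once.
def Pre_sim_run (track : List String) (operations : List Int) (loops : Int) : Prop :=
  operations ≠ [] ∨ loops * (track.length : Int) ≤ 0
instance (track : List String) (operations : List Int) (loops : Int) : Decidable (Pre_sim_run track operations loops) := by unfold Pre_sim_run; infer_instance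

def pvWitness_sim_run : List String × List Int × Int := (["+", "=", "-"], [3, -2], 4)

def Spec_sim_run (track : List String) (operations : List Int) (loops : Int) (out : Int) : Prop := out = sim_run_alt track operations loops
instance (track : List String) (operations : List Int) (loops : Int) (out : Int) : Decidable (Spec_sim_run track operations loops out) := by unfold Spec_sim_run; infer_instance

-- ===== CLAIM (what is proved, stated in full; the proofs are below) =====
def Claim_equal_sim_run : Prop := ∀ (track : List String) (operations : List Int) (loops : Int), Dom_sim_run track operations loops → Pre_sim_run track operations loops → Spec_sim_run track operations loops (sim_run track operations loops)

-- ===== LEMMAS AND PROOFS =====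

-- weighted sum of a delta list: each element times the number of elements from it on
def pvWsum : List Int → Int
  | [] => 0
  | d :: ds => d * ((ds.length : Int) + 1) + pvWsum ds

-- A's fold, characterised via the per-step delta
theorem pvA_fold (f : Int → Int) (xs : List Int) : ∀ (i t : Int),
    (xs.foldl (fun (s : Int × Int) x => (s.1 + f x, s.2 + s.1 + f x)) (i, t)).2
      = t + i * (xs.length : Int) + pvWsum (xs.map f) := by
  induction xs with
  | nil => intro i t; simp [pvWsum]
  | cons x xs ih =>
    intro i t
    simp only [List.foldl_cons, List.map_cons, pvWsum, List.length_cons, List.length_map, ih]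
    push_cast
    ring

theorem pvA_step_eq (track : List String) (operations : List Int) :
    (fun (s : Int × Int) x =>
      let p := PySem.Int.mod (x + 1) (track.length : Int)
      let op := PySem.List.pyGetD operations (PySem.Int.mod x (operations.length : Int)) 0
      let c := PySem.List.pyGetD track p ""
      let initial :=
        if c = "+" then s.1 + 1
        else if c = "-" then s.1 - 1
        else if c = "=" ∨ c = "S" then s.1 + op
        else s.1
      (initial, s.2 + initial))
    = (fun (s : Int × Int) x => (s.1 + pvStepDelta track operations x, s.2 + s.1 + pvStepDelta track operations x)) := by
  funext s x
  simp only [pvStepDelta]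
  split_ifs <;> refine Prod.ext ?_ ?_ <;> simp <;> ring

-- the front-to-back weighted sum B's reversed walk computes, starting at weight w
def pvWalk : List Int → Int → Int
  | [], _ => 0
  | d :: ds, w => d * (w + 1) + pvWalk ds (w + 1)

theorem pvB_fold (l : List Int) : ∀ (w t : Int),
    (l.foldl (fun (s : Int × Int) d => (s.1 + 1, s.2 + d * (s.1 + 1))) (w, t)).2
      = t + pvWalk l w := by
  induction l with
  | nil => intro w t; simp [pvWalk]
  | cons d ds ih =>
    intro w t
    simp only [List.foldl_cons, pvWalk, ih]
    ring

theorem pvWalk_append (l : List Int) (d : Int) : ∀ w : Int,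
    pvWalk (l ++ [d]) w = pvWalk l w + d * (w + (l.length : Int) + 1) := by
  induction l with
  | nil => intro w; simp [pvWalk]
  | cons x xs ih =>
    intro w
    simp only [List.cons_append, pvWalk, ih, List.length_cons]
    push_cast
    ring

theorem pvWalk_reverse (l : List Int) : pvWalk l.reverse 0 = pvWsum l := by
  induction l with
  | nil => simp [pvWalk, pvWsum]
  | cons d ds ih =>
    simp only [List.reverse_cons, pvWalk_append, ih, pvWsum, List.length_reverse]
    ring

theorem sim_run_eq_alt (track : List String) (operations : List Int) (loops : Int) :
    sim_run track operations loops = sim_run_alt track operations loops := by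
  unfold sim_run sim_run_alt
  set n : Int := loops * (track.length : Int) with hn
  by_cases h : n ≤ 0
  · rw [PySem.List.pyRange_one_eq_nil h]
    simp [h]
  · simp only [h, if_false]
    rw [pvA_step_eq track operations]
    rw [pvA_fold (pvStepDelta track operations)]
    rw [pvB_fold]
    rw [pvWalk_reverse]
    have hlen : ((PySem.List.pyRange 0 n 1).length : Int) = n := by
      rw [PySem.List.length_pyRange_one]; omega
    rw [hlen]
    ring

-- ===== VERDICT (by name: the statement is the Claim_ definition above) =====
theorem sim_run_spec : Claim_equal_sim_run := by
  intro track operations loops _ _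
  unfold Spec_sim_run
  exact sim_run_eq_alt track operations loops
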